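-- pv_equiv track=rewrite | github.com/kmatata/km_FullText | utils/stop_words_utils.py | generate_roman_numeral_stop_words
-- ===== SOURCE A (Python) =====
-- def generate_roman_numeral_stop_words(max_number=50):
--     """
--     Generate Roman numerals and common patterns
--     """
--
--     def int_to_roman(num):
--         val = [1000, 900, 500, 400, 100, 90, 50, 40, 10, 9, 5, 4, 1]
--         syb = ["M", "CM", "D", "CD", "C", "XC", "L", "XL", "X", "IX", "V", "IV", "I"]
--         roman_num = ""
--         i = 0
--         while num > 0:
--             for _ in range(num // val[i]):
--                 roman_num += syb[i]
--                 num -= val[i]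
--             i += 1
--         return roman_num
--
--     numerals = [int_to_roman(i) for i in range(1, max_number + 1)]
--     patterns = []
--
--     # Add standalone numerals and common patterns
--     for numeral in numerals:
--         patterns.append(numeral)
--         patterns.extend(
--             [
--                 f"team {numeral}",
--                 f"division {numeral}",
--                 f"div {numeral}",
--                 f"group {numeral}",
--                 f"serie {numeral}",
--                 f"liga {numeral}",
--                 f"{numeral} liga",
--                 f"{numeral} division",
--                 f"{numeral} div",
--             ]
--         )
--
--     return patterns
-- ===== SOURCE B (Python) =====
-- def generate_roman_numeral_stop_words(max_number=50):
--     """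
--     Generate Roman numerals and common patterns
--     """
--     hundreds = ["", "C", "CC", "CCC", "CD", "D", "DC", "DCC", "DCCC", "CM"]
--     tens = ["", "X", "XX", "XXX", "XL", "L", "LX", "LXX", "LXXX", "XC"]
--     ones = ["", "I", "II", "III", "IV", "V", "VI", "VII", "VIII", "IX"]
--
--     def int_to_roman(num):
--         return (
--             "M" * (num // 1000)
--             + hundreds[num // 100 % 10]
--             + tens[num // 10 % 10]
--             + ones[num % 10]
--         )
--
--     templates = [
--         ("", ""),
--         ("team ", ""),
--         ("division ", ""),
--         ("div ", ""),
--         ("group ", ""),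
--         ("serie ", ""),
--         ("liga ", ""),
--         ("", " liga"),
--         ("", " division"),
--         ("", " div"),
--     ]
--     return [
--         pre + int_to_roman(n) + suf
--         for n in range(1, max_number + 1)
--         for pre, suf in templates
--     ]
-- ===== Notes on version B (the rewrite author's own statement) =====
-- stated objective: alternative
-- what changed: int_to_roman's greedy subtraction loop over the value/symbol table is replaced by direct decimal-digit lookup ('M' repeated n//1000 times plus precomputed hundreds/tens/ones tables), and the append/extend accumulator loop is replaced by a flat comprehension over (prefix, suffix) templates.
import Mathlib
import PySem

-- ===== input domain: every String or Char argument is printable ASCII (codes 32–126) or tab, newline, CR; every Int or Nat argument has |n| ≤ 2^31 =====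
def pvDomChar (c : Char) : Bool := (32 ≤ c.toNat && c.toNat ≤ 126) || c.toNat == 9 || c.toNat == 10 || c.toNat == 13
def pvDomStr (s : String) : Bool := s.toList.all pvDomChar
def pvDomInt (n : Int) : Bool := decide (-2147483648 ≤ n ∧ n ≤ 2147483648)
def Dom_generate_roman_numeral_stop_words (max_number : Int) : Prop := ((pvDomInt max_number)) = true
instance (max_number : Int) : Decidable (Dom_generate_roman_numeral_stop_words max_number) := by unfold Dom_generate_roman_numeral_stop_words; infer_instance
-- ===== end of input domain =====

-- ===== PORT A =====
-- B replaces A's greedy subtraction loop by direct digit-table lookup and the append/extend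
-- loop by a flat comprehension over (prefix, suffix) templates (alternative decomposition, same cost).

-- A's value/symbol table (the two parallel lists `val`/`syb`, zipped so `val[i]`,`syb[i]` travel together).
def pvATable : List (Int × String) :=
  [(1000, "M"), (900, "CM"), (500, "D"), (400, "CD"), (100, "C"), (90, "XC"),
   (50, "L"), (40, "XL"), (10, "X"), (9, "IX"), (5, "V"), (4, "IV"), (1, "I")]

-- `while num > 0: for _ in range(num // val[i]): roman_num += syb[i]; num -= val[i]; i += 1`
-- as recursion over the table suffix starting at index `i`; the `[]` case returns the accumulator,
-- which is unreachable with num > 0 in Python (val ends in 1, so num hits 0 before i leaves the table).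
def pvAWhile : List (Int × String) → String → Int → String
  | [], roman_num, _ => roman_num
  | (v, s) :: rest, roman_num, num =>
    if num > 0 then
      let st := (PySem.List.pyRange 0 (PySem.Int.floordiv num v) 1).foldl
        (fun (p : String × Int) _ => (p.1 ++ s, p.2 - v)) (roman_num, num)
      pvAWhile rest st.1 st.2
    else roman_num

def pvIntToRomanA (num : Int) : String := pvAWhile pvATable "" num

def generate_roman_numeral_stop_words (max_number : Int) : List String :=
  let numerals := (PySem.List.pyRange 1 (max_number + 1) 1).map pvIntToRomanA
  numerals.foldl (fun patterns numeral =>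
    (patterns ++ [numeral]) ++
      ["team " ++ numeral, "division " ++ numeral, "div " ++ numeral,
       "group " ++ numeral, "serie " ++ numeral, "liga " ++ numeral,
       numeral ++ " liga", numeral ++ " division", numeral ++ " div"]) []

-- ===== PORT B =====
def pvHundreds : List String := ["", "C", "CC", "CCC", "CD", "D", "DC", "DCC", "DCCC", "CM"]
def pvTens : List String := ["", "X", "XX", "XXX", "XL", "L", "LX", "LXX", "LXXX", "XC"]
def pvOnes : List String := ["", "I", "II", "III", "IV", "V", "VI", "VII", "VIII", "IX"]

-- hand port of Python's `s * k` on strings (no PySem Str primitive): the character list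
-- repeated k times; exact for every k (k ≤ 0 gives "").
def pvStrMul (s : String) (k : Int) : String := String.ofList (PySem.List.pyRepeat s.toList k)

-- the list indices are `… % 10` of a nonnegative number, hence provably in [0, 10):
-- `pyGetD _ _ ""` is exact there (Python indexing raises only out of range, which cannot happen).
def pvIntToRomanB (num : Int) : String :=
  pvStrMul "M" (PySem.Int.floordiv num 1000)
    ++ PySem.List.pyGetD pvHundreds (PySem.Int.mod (PySem.Int.floordiv num 100) 10) ""
    ++ PySem.List.pyGetD pvTens (PySem.Int.mod (PySem.Int.floordiv num 10) 10) ""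
    ++ PySem.List.pyGetD pvOnes (PySem.Int.mod num 10) ""

def pvTemplates : List (String × String) :=
  [("", ""), ("team ", ""), ("division ", ""), ("div ", ""), ("group ", ""),
   ("serie ", ""), ("liga ", ""), ("", " liga"), ("", " division"), ("", " div")]

def generate_roman_numeral_stop_words_alt (max_number : Int) : List String :=
  (PySem.List.pyRange 1 (max_number + 1) 1).flatMap (fun n =>
    pvTemplates.map (fun t => t.1 ++ pvIntToRomanB n ++ t.2))

-- ===== PRECONDITION & SPEC =====
def Spec_generate_roman_numeral_stop_words (max_number : Int) (out : List String) : Prop := out = generate_roman_numeral_stop_words_alt max_number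
instance (max_number : Int) (out : List String) : Decidable (Spec_generate_roman_numeral_stop_words max_number out) := by unfold Spec_generate_roman_numeral_stop_words; infer_instance

-- ===== CLAIM (what is proved, stated in full; the proofs are below) =====
def Claim_equal_generate_roman_numeral_stop_words : Prop := ∀ (max_number : Int), Dom_generate_roman_numeral_stop_words max_number → Spec_generate_roman_numeral_stop_words max_number (generate_roman_numeral_stop_words max_number)

-- ===== LEMMAS AND PROOFS =====

-- s repeated k times, appended on the right (the shape A's `+=` loop produces)
def pvRepS (s : String) : Nat → String
  | 0 => ""
  | k + 1 => pvRepS s k ++ s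

theorem pvRepS_succ_left (s : String) (k : Nat) : pvRepS s (k + 1) = s ++ pvRepS s k := by
  induction k with
  | zero => simp [pvRepS]
  | succ k ih =>
    calc pvRepS s (k + 1 + 1) = pvRepS s (k + 1) ++ s := rfl
      _ = s ++ pvRepS s k ++ s := by rw [ih]
      _ = s ++ pvRepS s (k + 1) := by rw [String.append_assoc, show pvRepS s k ++ s = pvRepS s (k + 1) from rfl]

theorem pvRepS_eq_ofList_replicate (c : Char) (k : Nat) :
    pvRepS (String.ofList [c]) k = String.ofList (List.replicate k c) := by
  induction k with
  | zero => rfl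
  | succ k ih =>
    calc pvRepS (String.ofList [c]) (k + 1)
        = pvRepS (String.ofList [c]) k ++ String.ofList [c] := rfl
      _ = String.ofList (List.replicate (k + 1) c) := by
          rw [ih, ← String.ofList_append, ← List.replicate_succ']

-- the inner `for` loop: appends s once per element and subtracts v once per element
theorem pvFoldl_emit (s : String) (v : Int) (l : List Int) (r : String) (num : Int) :
    l.foldl (fun (p : String × Int) _ => (p.1 ++ s, p.2 - v)) (r, num)
      = (r ++ pvRepS s l.length, num - l.length * v) := by
  induction l generalizing r num with
  | nil => simp [pvRepS]
  | cons a l ih =>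
    rw [List.foldl_cons, ih]
    refine Prod.ext ?_ ?_
    · show r ++ s ++ pvRepS s l.length = r ++ pvRepS s (l.length + 1)
      rw [pvRepS_succ_left, String.append_assoc]
    · show num - v - ↑l.length * v = num - ↑(l.length + 1) * v
      push_cast
      ring

theorem pvAWhile_nonpos (t : List (Int × String)) (r : String) (num : Int) (h : num ≤ 0) :
    pvAWhile t r num = r := by
  cases t with
  | nil => rfl
  | cons p rest =>
    cases p
    have hng : ¬ num > 0 := by omega
    simp [pvAWhile, hng]

-- one pass of the while loop over one table entry
theorem pvAWhile_step (v : Int) (s : String) (rest : List (Int × String)) (r : String)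
    (num : Int) (hv : 0 < v) (hnum : 0 ≤ num) :
    pvAWhile ((v, s) :: rest) r num
      = pvAWhile rest (r ++ pvRepS s (PySem.Int.floordiv num v).toNat)
          (PySem.Int.mod num v) := by
  by_cases hpos : num > 0
  · have hq0 : 0 ≤ PySem.Int.floordiv num v := by
      rw [PySem.Int.floordiv_eq_ediv_of_pos hv]; exact Int.ediv_nonneg hnum (le_of_lt hv)
    simp only [pvAWhile, if_pos hpos]
    rw [pvFoldl_emit]
    have hlen : ((PySem.List.pyRange 0 (PySem.Int.floordiv num v) 1).length : Int)
        = PySem.Int.floordiv num v := by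
      rw [PySem.List.length_pyRange_one]
      omega
    have hmm := PySem.Int.floordiv_mul_add_mod num v
    have harg : num - ((PySem.List.pyRange 0 (PySem.Int.floordiv num v) 1).length : Int) * v
        = PySem.Int.mod num v := by rw [hlen]; linarith
    have hlenNat : (PySem.List.pyRange 0 (PySem.Int.floordiv num v) 1).length
        = (PySem.Int.floordiv num v).toNat := by omega
    rw [harg, hlenNat]
  · have h0 : num = 0 := by omega
    subst h0
    have hq : PySem.Int.floordiv 0 v = 0 := by
      rw [PySem.Int.floordiv_eq_ediv_of_pos hv]; simp
    have hm : PySem.Int.mod 0 v = 0 := by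
      have := PySem.Int.floordiv_mul_add_mod 0 v
      rw [hq] at this; linarith
    rw [hq, hm, pvAWhile_nonpos _ _ _ (le_refl 0), pvAWhile_nonpos _ _ _ (le_refl 0)]
    simp [pvRepS]

-- the accumulator is a pure prefix of the result
theorem pvAWhile_prefix (t : List (Int × String)) (r : String) (num : Int) :
    pvAWhile t r num = r ++ pvAWhile t "" num := by
  induction t generalizing r num with
  | nil => simp [pvAWhile]
  | cons p rest ih =>
    obtain ⟨v, s⟩ := p
    by_cases hpos : num > 0
    · simp only [pvAWhile, if_pos hpos]
      rw [pvFoldl_emit, pvFoldl_emit]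
      show pvAWhile rest (r ++ pvRepS s _) _ = r ++ pvAWhile rest ("" ++ pvRepS s _) _
      rw [ih (r ++ pvRepS s _), ih ("" ++ pvRepS s _)]
      simp [String.append_assoc]
    · simp [pvAWhile, if_neg hpos]

-- digit-place part of B, phrased on the remainder m = num % 1000
def pvLow (m : Int) : String :=
  PySem.List.pyGetD pvHundreds (PySem.Int.floordiv m 100) ""
    ++ PySem.List.pyGetD pvTens (PySem.Int.floordiv (PySem.Int.mod m 100) 10) ""
    ++ PySem.List.pyGetD pvOnes (PySem.Int.mod m 10) ""

-- core finite check: the greedy loop over the sub-1000 tail of the table equals the digit tables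
set_option maxRecDepth 100000 in
theorem pvSmall_core : ∀ m : Fin 1000,
    pvAWhile (pvATable.drop 1) "" (m : Int) = pvLow (m : Int) := by
  decide

theorem pvRoman_eq (num : Int) (h : 0 ≤ num) : pvIntToRomanA num = pvIntToRomanB num := by
  have htab : pvATable = (1000, "M") :: pvATable.drop 1 := rfl
  have hstep := pvAWhile_step 1000 "M" (pvATable.drop 1) "" num (by norm_num) h
  set m1 := PySem.Int.mod num 1000 with hm1
  have hm1lo : 0 ≤ m1 := PySem.Int.mod_nonneg num (by norm_num)
  have hm1hi : m1 < 1000 := PySem.Int.mod_lt num (by norm_num)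
  have hcore := pvSmall_core ⟨m1.toNat, by omega⟩
  have hm1cast : ((m1.toNat : Nat) : Int) = m1 := by omega
  rw [pvIntToRomanA, htab, hstep, pvAWhile_prefix]
  simp only [hm1cast] at hcore
  rw [hcore]
  -- now both sides are explicit concatenations; match the pieces
  have hM : pvRepS "M" (PySem.Int.floordiv num 1000).toNat
      = pvStrMul "M" (PySem.Int.floordiv num 1000) := by
    have : ("M" : String) = String.ofList ['M'] := rfl
    rw [pvStrMul, this, pvRepS_eq_ofList_replicate]
    rw [show (String.ofList ['M']).toList = ['M'] from rfl, PySem.List.pyRepeat_singleton]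
  have e1 : PySem.Int.floordiv m1 100 = PySem.Int.mod (PySem.Int.floordiv num 100) 10 := by
    simp only [hm1, PySem.Int.floordiv_eq_ediv_of_pos (by norm_num : (0:Int) < 100),
      PySem.Int.mod_eq_emod_of_pos (by norm_num : (0:Int) < 10),
      PySem.Int.mod_eq_emod_of_pos (by norm_num : (0:Int) < 1000)]
    omega
  have e2 : PySem.Int.floordiv (PySem.Int.mod m1 100) 10
      = PySem.Int.mod (PySem.Int.floordiv num 10) 10 := by
    simp only [hm1, PySem.Int.floordiv_eq_ediv_of_pos (by norm_num : (0:Int) < 10),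
      PySem.Int.mod_eq_emod_of_pos (by norm_num : (0:Int) < 10),
      PySem.Int.mod_eq_emod_of_pos (by norm_num : (0:Int) < 100),
      PySem.Int.mod_eq_emod_of_pos (by norm_num : (0:Int) < 1000)]
    omega
  have e3 : PySem.Int.mod m1 10 = PySem.Int.mod num 10 := by
    simp only [hm1, PySem.Int.mod_eq_emod_of_pos (by norm_num : (0:Int) < 10),
      PySem.Int.mod_eq_emod_of_pos (by norm_num : (0:Int) < 1000)]
    omega
  rw [pvIntToRomanB, pvLow, e1, e2, e3, ← hM]
  simp [String.append_assoc]

theorem pvTemplates_map (r : String) :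
    pvTemplates.map (fun t => t.1 ++ r ++ t.2)
      = [r, "team " ++ r, "division " ++ r, "div " ++ r, "group " ++ r, "serie " ++ r,
         "liga " ++ r, r ++ " liga", r ++ " division", r ++ " div"] := by
  simp [pvTemplates]

-- ===== VERDICT (by name: the statement is the Claim_ definition above) =====
theorem generate_roman_numeral_stop_words_spec : Claim_equal_generate_roman_numeral_stop_words := by
  intro m _
  unfold Spec_generate_roman_numeral_stop_words
  unfold generate_roman_numeral_stop_words generate_roman_numeral_stop_words_alt
  simp only [List.append_assoc, List.singleton_append]
  rw [PySem.List.foldl_append_eq_flatMap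
    (fun numeral => numeral :: ["team " ++ numeral, "division " ++ numeral, "div " ++ numeral,
      "group " ++ numeral, "serie " ++ numeral, "liga " ++ numeral,
      numeral ++ " liga", numeral ++ " division", numeral ++ " div"])]
  rw [List.nil_append, List.flatMap_map]
  refine List.flatMap_congr (fun n hn => ?_)
  have hn1 : 1 ≤ n := (PySem.List.mem_pyRange_one.mp hn).1
  rw [pvTemplates_map, pvRoman_eq n (by omega)]
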